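-- pv_equiv track=rewrite | github.com/interstar/golden-pond | current/library/voiceleading.py | voice_lead
-- ===== SOURCE A (Python) =====
-- def octave_transform(input_chord, root=60):
--     """
--     Squish things into a single octave for comparison between chords and sort from lowest to highest.
--     """
--     return sorted([root + (x % 12) for x in input_chord])
--
-- def t_matrix(chord_a, chord_b):
--     """
--     Get the distances between the notes of two chords.
--     """
--     transformed_a = octave_transform(chord_a)
--     transformed_b = octave_transform(chord_b)
--     return [b - a for a, b in zip(transformed_a, transformed_b)]
--
-- def get_permutations(lst):
--     if len(lst) == 3:
--         return [
--             [lst[0], lst[1], lst[2]],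
--             [lst[0], lst[2], lst[1]],
--             [lst[1], lst[0], lst[2]],
--             [lst[1], lst[2], lst[0]],
--             [lst[2], lst[0], lst[1]],
--             [lst[2], lst[1], lst[0]]
--         ]
--     elif len(lst) == 4:
--         return [
--             [lst[0], lst[1], lst[2], lst[3]],
--             [lst[0], lst[1], lst[3], lst[2]],
--             [lst[0], lst[2], lst[1], lst[3]],
--             [lst[0], lst[2], lst[3], lst[1]],
--             [lst[0], lst[3], lst[1], lst[2]],
--             [lst[0], lst[3], lst[2], lst[1]],
--             [lst[1], lst[0], lst[2], lst[3]],
--             [lst[1], lst[0], lst[3], lst[2]],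
--             [lst[1], lst[2], lst[0], lst[3]],
--             [lst[1], lst[2], lst[3], lst[0]],
--             [lst[1], lst[3], lst[0], lst[2]],
--             [lst[1], lst[3], lst[2], lst[0]],
--             [lst[2], lst[0], lst[1], lst[3]],
--             [lst[2], lst[0], lst[3], lst[1]],
--             [lst[2], lst[1], lst[0], lst[3]],
--             [lst[2], lst[1], lst[3], lst[0]],
--             [lst[2], lst[3], lst[0], lst[1]],
--             [lst[2], lst[3], lst[1], lst[0]],
--             [lst[3], lst[0], lst[1], lst[2]],
--             [lst[3], lst[0], lst[2], lst[1]],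
--             [lst[3], lst[1], lst[0], lst[2]],
--             [lst[3], lst[1], lst[2], lst[0]],
--             [lst[3], lst[2], lst[0], lst[1]],
--             [lst[3], lst[2], lst[1], lst[0]]
--         ]
--     else:
--         return [lst]  # Return the list itself if it's not of length 3 or 4
--
-- def voice_lead(chord_a, chord_b):
--     """
--     Determine the voice leading between two chords.
--     """
--     transformed_a = octave_transform(chord_a)
--     transformed_b = octave_transform(chord_b)
--
--     # If chord_a has more notes than chord_b, drop the excess notes from chord_a
--     while len(transformed_a) > len(transformed_b):
--         transformed_a.pop()  # Drop the highest note
--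
--     # If chord_b has more notes than chord_a, drop the excess notes from chord_b
--     while len(transformed_b) > len(transformed_a):
--         transformed_b.pop()  # Drop the highest note
--
--     best_voicing = None
--     min_distance = float('inf')
--
--     for permuted_b in get_permutations(transformed_b):
--         t_mat = t_matrix(transformed_a, list(permuted_b))
--         total_distance = sum(abs(t) for t in t_mat)
--
--         # Penalize for notes that are too close to each other
--         for i in range(len(permuted_b) - 1):
--             if abs(permuted_b[i] - permuted_b[i + 1]) in [1, 2]:  # If notes are a semitone or a tone apart
--                 total_distance += 10  # Add a penalty
--
--         if total_distance < min_distance: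
--             min_distance = total_distance
--             best_voicing = [a + t for a, t in zip(chord_a, t_mat)]
--
--     return best_voicing
-- ===== SOURCE B (Python) =====
-- def voice_lead(chord_a, chord_b):
--     """
--     Determine the voice leading between two chords.
--
--     Closed form: octave-transforming any permutation re-sorts it, so every
--     candidate in A's permutation loop yields the same t-matrix and the same
--     voicing; the loop and penalty are dead weight.
--     """
--     ta = sorted(60 + (x % 12) for x in chord_a)
--     tb = sorted(60 + (x % 12) for x in chord_b)
--     m = min(len(ta), len(tb))
--     return [chord_a[i] + tb[i] - ta[i] for i in range(m)]
-- ===== Notes on version B (the rewrite author's own statement) =====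
-- stated objective: simpler
-- what changed: A's permutation search is vacuous (octave_transform re-sorts every permutation, so every candidate produces the same t-matrix and voicing); B replaces the whole loop, penalty and while-pop truncation by the direct closed form [chord_a[i] + tb[i] - ta[i] for i < min(len)].
import Mathlib
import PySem

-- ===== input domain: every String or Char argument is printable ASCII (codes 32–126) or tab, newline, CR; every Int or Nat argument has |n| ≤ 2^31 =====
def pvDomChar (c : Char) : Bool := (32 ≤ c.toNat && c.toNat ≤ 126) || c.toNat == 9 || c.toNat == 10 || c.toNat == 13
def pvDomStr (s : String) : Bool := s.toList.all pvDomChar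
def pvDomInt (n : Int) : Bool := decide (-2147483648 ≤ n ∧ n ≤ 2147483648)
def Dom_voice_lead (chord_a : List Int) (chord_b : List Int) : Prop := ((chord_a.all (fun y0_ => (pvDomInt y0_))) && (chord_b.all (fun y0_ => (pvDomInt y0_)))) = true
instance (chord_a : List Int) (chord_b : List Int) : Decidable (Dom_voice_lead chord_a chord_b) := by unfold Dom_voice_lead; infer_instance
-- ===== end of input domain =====

-- B replaces A's vacuous permutation search (octave_transform re-sorts every
-- permutation, so every candidate yields the same voicing) by the direct
-- closed form [chord_a[i] + tb[i] - ta[i]]; objective: simpler.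
-- A mutates only local lists, so return-value equivalence is full equivalence.

-- ===== PORT A =====
def octave_transform (input_chord : List Int) (root : Int) : List Int :=
  PySem.List.sorted (input_chord.map (fun x => root + PySem.Int.mod x 12)) (fun y => y) false

def t_matrix (chord_a : List Int) (chord_b : List Int) : List Int :=
  let transformed_a := octave_transform chord_a 60
  let transformed_b := octave_transform chord_b 60
  (transformed_a.zip transformed_b).map (fun p => p.2 - p.1)

def get_permutations (lst : List Int) : List (List Int) :=
  match lst with
  | [a, b, c] =>
      [[a,b,c],[a,c,b],[b,a,c],[b,c,a],[c,a,b],[c,b,a]]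
  | [a, b, c, d] =>
      [[a,b,c,d],[a,b,d,c],[a,c,b,d],[a,c,d,b],[a,d,b,c],[a,d,c,b],
       [b,a,c,d],[b,a,d,c],[b,c,a,d],[b,c,d,a],[b,d,a,c],[b,d,c,a],
       [c,a,b,d],[c,a,d,b],[c,b,a,d],[c,b,d,a],[c,d,a,b],[c,d,b,a],
       [d,a,b,c],[d,a,c,b],[d,b,a,c],[d,b,c,a],[d,c,a,b],[d,c,b,a]]
  | _ => [lst]

-- the `while len(xs) > n: xs.pop()` loop
def popLoop (xs : List Int) (n : Nat) : List Int :=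
  if n < xs.length then popLoop xs.dropLast n else xs
termination_by xs.length
decreasing_by simp [List.length_dropLast]; omega

def voice_lead (chord_a : List Int) (chord_b : List Int) : Option (List Int) :=
  let transformed_a := popLoop (octave_transform chord_a 60) (octave_transform chord_b 60).length
  let transformed_b := popLoop (octave_transform chord_b 60) transformed_a.length
  -- fold state: (best_voicing, min_distance); None = float('inf')
  (((get_permutations transformed_b).foldl (fun st permuted_b =>
      let t_mat := t_matrix transformed_a permuted_b
      let base := (t_mat.map (fun t => |t|)).sum
      -- penalty loop; indices i, i+1 are always in range, so getD is exact
      let total := (List.range (permuted_b.length - 1)).foldl (fun acc i =>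
          if |permuted_b.getD i 0 - permuted_b.getD (i+1) 0| = 1 ∨
             |permuted_b.getD i 0 - permuted_b.getD (i+1) 0| = 2
          then acc + 10 else acc) base
      match st.2 with
      | none => (some ((chord_a.zip t_mat).map (fun p => p.1 + p.2)), some total)
      | some md =>
          if total < md then
            (some ((chord_a.zip t_mat).map (fun p => p.1 + p.2)), some total)
          else st)
    ((none : Option (List Int)), (none : Option Int))).1)

-- ===== PORT B =====
def voice_lead_alt (chord_a : List Int) (chord_b : List Int) : Option (List Int) :=
  let ta := PySem.List.sorted (chord_a.map (fun x => 60 + PySem.Int.mod x 12)) (fun y => y) false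
  let tb := PySem.List.sorted (chord_b.map (fun x => 60 + PySem.Int.mod x 12)) (fun y => y) false
  let m := min ta.length tb.length
  -- indices i < m are in range for chord_a, ta and tb, so getD is exact
  some ((List.range m).map (fun i => chord_a.getD i 0 + tb.getD i 0 - ta.getD i 0))

-- ===== PRECONDITION & SPEC =====
def Spec_voice_lead (chord_a : List Int) (chord_b : List Int) (out : Option (List Int)) : Prop := out = voice_lead_alt chord_a chord_b
instance (chord_a : List Int) (chord_b : List Int) (out : Option (List Int)) : Decidable (Spec_voice_lead chord_a chord_b out) := by unfold Spec_voice_lead; infer_instance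

-- ===== CLAIM (what is proved, stated in full; the proofs are below) =====
def Claim_equal_voice_lead : Prop := ∀ (chord_a : List Int) (chord_b : List Int), Dom_voice_lead chord_a chord_b → Spec_voice_lead chord_a chord_b (voice_lead chord_a chord_b)

-- ===== LEMMAS AND PROOFS =====

theorem popLoop_eq_take (xs : List Int) (n : Nat) :
    popLoop xs n = xs.take (min xs.length n) := by
  induction xs using popLoop.induct n with
  | case1 xs h ih =>
      rw [popLoop, if_pos h, ih]
      have hlen : xs.dropLast.length = xs.length - 1 := List.length_dropLast
      have hmin1 : min xs.dropLast.length n = n := by omega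
      have hmin2 : min xs.length n = n := by omega
      rw [hmin1, hmin2, List.dropLast_eq_take, List.take_take]
      congr 1; omega
  | case2 xs h =>
      rw [popLoop, if_neg h]
      have : min xs.length n = xs.length := by omega
      rw [this, List.take_length]

-- elements of an octave transform lie in [60, 72)
theorem mem_oct_bounds (xs : List Int) (y : Int)
    (hy : y ∈ octave_transform xs 60) : 60 ≤ y ∧ y < 72 := by
  unfold octave_transform at hy
  rw [PySem.List.mem_sorted] at hy
  obtain ⟨x, -, rfl⟩ := List.mem_map.mp hy
  have h1 := PySem.Int.mod_nonneg x (b := 12) (by norm_num)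
  have h2 := PySem.Int.mod_lt x (b := 12) (by norm_num)
  omega

-- octave_transform is the identity on a sorted list with entries in [60, 72)
theorem oct_fix (xs : List Int) (hs : xs.Pairwise (· ≤ ·))
    (hb : ∀ y ∈ xs, 60 ≤ y ∧ y < 72) : octave_transform xs 60 = xs := by
  unfold octave_transform
  have hmap : xs.map (fun x => 60 + PySem.Int.mod x 12) = xs := by
    nth_rewrite 2 [← List.map_id xs]
    refine List.map_congr_left fun y hy => ?_
    simp only [id]
    have hb' := hb y hy
    have : PySem.Int.mod y 12 = y % 12 :=
      PySem.Int.mod_eq_emod_of_pos (by norm_num)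
    have h12 : y % 12 = y - 60 := by
      have : y = (y - 60) + 12 * 5 := by ring
      rw [this, Int.add_mul_emod_self_left, Int.emod_eq_of_lt (by omega) (by omega)]
      omega
    omega
  rw [hmap]
  exact PySem.List.sorted_eq_self_of_pairwise xs (fun y => y) hs

-- every member of get_permutations is a permutation of the argument
theorem perm_of_mem_get_permutations (lst p : List Int)
    (hp : p ∈ get_permutations lst) : p.Perm lst := by
  unfold get_permutations at hp
  match lst with
  | [a, b, c] =>
      simp only [List.mem_cons, List.not_mem_nil, or_false] at hp
      rcases hp with rfl|rfl|rfl|rfl|rfl|rfl <;>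
        · refine List.perm_iff_count.mpr fun v => ?_
          simp [List.count_cons]; try ring
  | [a, b, c, d] =>
      simp only [List.mem_cons, List.not_mem_nil, or_false] at hp
      rcases hp with rfl|rfl|rfl|rfl|rfl|rfl|rfl|rfl|rfl|rfl|rfl|rfl|rfl|rfl|rfl|rfl|rfl|rfl|rfl|rfl|rfl|rfl|rfl|rfl <;>
        · refine List.perm_iff_count.mpr fun v => ?_
          simp [List.count_cons]; try ring
  | [] => simp at hp; simp [hp]
  | [a] => simp at hp; simp [hp]
  | [a, b] => simp at hp; simp [hp]
  | a :: b :: c :: d :: e :: rest => simp at hp; simp [hp]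

-- get_permutations always starts with the list itself
theorem get_permutations_head (lst : List Int) :
    ∃ rest, get_permutations lst = lst :: rest := by
  unfold get_permutations
  match lst with
  | [a, b, c] => exact ⟨_, rfl⟩
  | [a, b, c, d] => exact ⟨_, rfl⟩
  | [] => exact ⟨[], rfl⟩
  | [a] => exact ⟨[], rfl⟩
  | [a, b] => exact ⟨[], rfl⟩
  | a :: b :: c :: d :: e :: rest => exact ⟨[], rfl⟩

-- once best_voicing is some v with matching min_distance, and every remaining
-- candidate has the same t-matrix, the fold keeps best_voicing = some v
theorem fold_best (chord_a ta tmat : List Int) (ps : List (List Int))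
    (h : ∀ p ∈ ps, t_matrix ta p = tmat) (d : Int) :
    ((ps.foldl (fun st permuted_b =>
      let t_mat := t_matrix ta permuted_b
      let base := (t_mat.map (fun t => |t|)).sum
      let total := (List.range (permuted_b.length - 1)).foldl (fun acc i =>
          if |permuted_b.getD i 0 - permuted_b.getD (i+1) 0| = 1 ∨
             |permuted_b.getD i 0 - permuted_b.getD (i+1) 0| = 2
          then acc + 10 else acc) base
      match st.2 with
      | none => (some ((chord_a.zip t_mat).map (fun p => p.1 + p.2)), some total)
      | some md =>
          if total < md then
            (some ((chord_a.zip t_mat).map (fun p => p.1 + p.2)), some total)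
          else st)
      (some ((chord_a.zip tmat).map (fun p => p.1 + p.2)), some d)).1)
    = some ((chord_a.zip tmat).map (fun p => p.1 + p.2)) := by
  induction ps generalizing d with
  | nil => rfl
  | cons p ps ih =>
      rw [List.foldl_cons]
      simp only []
      rw [h p (List.mem_cons_self)]
      split_ifs <;> exact ih (fun q hq => h q (List.mem_cons_of_mem _ hq)) _

theorem voice_lead_spec : Claim_equal_voice_lead := by
  intro a b _
  unfold Spec_voice_lead
  have hla : (octave_transform a 60).length = a.length := by
    unfold octave_transform; rw [PySem.List.length_sorted, List.length_map]
  have hlb : (octave_transform b 60).length = b.length := by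
    unfold octave_transform; rw [PySem.List.length_sorted, List.length_map]
  set ta0 := octave_transform a 60 with hta0
  set tb0 := octave_transform b 60 with htb0
  set m := min ta0.length tb0.length with hm
  have hpa : popLoop ta0 tb0.length = ta0.take m := by rw [popLoop_eq_take]
  have hlta : (ta0.take m).length = m := by
    rw [List.length_take]; omega
  have hpb : popLoop tb0 (ta0.take m).length = tb0.take m := by
    rw [hlta, popLoop_eq_take]
    congr 1
    omega
  set ta := ta0.take m with hta
  set tb := tb0.take m with htb
  have hltb : tb.length = m := by rw [htb, List.length_take]; omega
  -- sortedness of the truncations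
  have hsa : ta.Pairwise (· ≤ ·) := by
    refine List.Pairwise.sublist (List.take_sublist m ta0) ?_
    have := PySem.List.sorted_pairwise (a.map (fun x => 60 + PySem.Int.mod x 12)) (fun y => y)
    simpa [hta0, octave_transform] using this
  have hsb : tb.Pairwise (· ≤ ·) := by
    refine List.Pairwise.sublist (List.take_sublist m tb0) ?_
    have := PySem.List.sorted_pairwise (b.map (fun x => 60 + PySem.Int.mod x 12)) (fun y => y)
    simpa [htb0, octave_transform] using this
  -- bounds of the truncations
  have hba : ∀ y ∈ ta, 60 ≤ y ∧ y < 72 := fun y hy =>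
    mem_oct_bounds a y (by rw [← hta0]; exact List.mem_of_mem_take hy)
  have hbb : ∀ y ∈ tb, 60 ≤ y ∧ y < 72 := fun y hy =>
    mem_oct_bounds b y (by rw [← htb0]; exact List.mem_of_mem_take hy)
  have hfixa : octave_transform ta 60 = ta := oct_fix ta hsa hba
  have hfixb : octave_transform tb 60 = tb := oct_fix tb hsb hbb
  -- every candidate permutation has the same t-matrix
  have htm : ∀ p ∈ get_permutations tb,
      t_matrix ta p = (ta.zip tb).map (fun q => q.2 - q.1) := by
    intro p hp
    unfold t_matrix
    have hperm : p.Perm tb := perm_of_mem_get_permutations tb p hp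
    have hoct : octave_transform p 60 = tb := by
      unfold octave_transform
      rw [PySem.List.sorted_eq_sorted_of_perm _ _ _ (fun {x y} h => h)
        (hperm.map (fun x => 60 + PySem.Int.mod x 12))]
      exact hfixb
    rw [hfixa, hoct]
  obtain ⟨rest, hgp⟩ := get_permutations_head tb
  have hrest : ∀ p ∈ rest, t_matrix ta p = (ta.zip tb).map (fun q => q.2 - q.1) :=
    fun p hp => htm p (by rw [hgp]; exact List.mem_cons_of_mem _ hp)
  have htbm : t_matrix ta tb = (ta.zip tb).map (fun q => q.2 - q.1) :=
    htm tb (by rw [hgp]; exact List.mem_cons_self)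
  rw [voice_lead]
  simp only [← hta0, ← htb0, hpa, hpb, hgp, List.foldl_cons]
  rw [htbm]
  rw [fold_best a ta ((ta.zip tb).map (fun q => q.2 - q.1)) rest hrest]
  -- closed form: the two lists agree pointwise
  rw [voice_lead_alt]
  have e1 : PySem.List.sorted (a.map (fun x => 60 + PySem.Int.mod x 12)) (fun y => y) false = ta0 :=
    hta0.symm
  have e2 : PySem.List.sorted (b.map (fun x => 60 + PySem.Int.mod x 12)) (fun y => y) false = tb0 :=
    htb0.symm
  simp only [e1, e2, ← hm]
  congr 1
  have hmla : m ≤ a.length := by omega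
  have hmlb : m ≤ b.length := by omega
  apply List.ext_getElem
  · simp [hlta, hltb]
    omega
  · intro i h1 h2
    simp only [List.getElem_map, List.getElem_zip, List.getElem_range]
    have him : i < m := by
      simp [hlta, hltb] at h1
      omega
    have hia : i < a.length := by omega
    have h3 : ta[i]'(by rw [hlta]; omega) = ta0[i]'(by omega) := by
      simp [hta]
    have h4 : tb[i]'(by rw [hltb]; omega) = tb0[i]'(by omega) := by
      simp [htb]
    rw [List.getD_eq_getElem a 0 hia, List.getD_eq_getElem tb0 0 (by omega),
      List.getD_eq_getElem ta0 0 (by omega)]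
    rw [h3, h4]
    ring
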